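-- pv_equiv track=rewrite | github.com/vishnumj005/string_reverse | string_reverse.py | reverse_each_word
-- ===== SOURCE A (Python) =====
-- def reverse_each_word(sentence):
--     word_list = []
--     for word in sentence.split(' '):
--         wd, rev_word = "", ""
--         if word.isalnum():
--             word_list.append(word[::-1])  # reverse the word if word has only alphanumeric
--         else:
--             for i, ch in enumerate(word):
--                 if ch.isalnum():
--                     wd = wd + ch  # append the characters till the special character found
--                 if i == len(word) - 1 or not ch.isalnum():
--                     rev_word = rev_word + wd[::-1]  # reverse the current word and append to the rev_word if the special character found or last character
--                     if not ch.isalnum():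
--                         rev_word = rev_word + ch  # append the special character without reversing
--                     wd = ""
--             word_list.append(rev_word)
--
--     return ' '.join(word_list)
-- ===== SOURCE B (Python) =====
-- def reverse_each_word(sentence):
--     # Run-based rewrite: split each word into maximal runs of same isalnum class,
--     # reverse the alnum runs, keep the others; same split/join outer structure.
--     words = []
--     for word in sentence.split(' '):
--         pieces = []
--         i, n = 0, len(word)
--         while i < n:
--             j = i + 1
--             while j < n and word[j].isalnum() == word[i].isalnum():
--                 j += 1
--             run = word[i:j]
--             pieces.append(run[::-1] if word[i].isalnum() else run)
--             i = j
--         words.append(''.join(pieces))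
--     return ' '.join(words)
-- ===== Notes on version B (the rewrite author's own statement) =====
-- stated objective: simpler
-- what changed: Replaces A's per-character accumulator loop with its last-index/special-char flush bookkeeping (plus a separate fully-alnum shortcut branch) by a uniform scan that extracts maximal runs of equal isalnum class and reverses just the alnum runs; the outer split-on-space/join structure is kept.
import Mathlib
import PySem

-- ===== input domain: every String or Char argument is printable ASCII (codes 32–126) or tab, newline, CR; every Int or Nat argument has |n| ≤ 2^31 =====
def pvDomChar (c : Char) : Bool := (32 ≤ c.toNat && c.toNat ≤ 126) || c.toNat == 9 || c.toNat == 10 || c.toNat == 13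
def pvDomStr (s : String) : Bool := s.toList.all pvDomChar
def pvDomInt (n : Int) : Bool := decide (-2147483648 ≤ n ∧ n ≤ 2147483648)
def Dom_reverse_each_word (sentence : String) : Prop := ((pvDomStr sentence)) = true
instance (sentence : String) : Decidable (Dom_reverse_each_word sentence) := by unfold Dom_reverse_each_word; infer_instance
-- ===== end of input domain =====

-- B replaces A's per-character accumulator loop (with last-index flush bookkeeping and a
-- fully-alnum shortcut) by extraction of maximal isalnum-class runs, reversing alnum runs.

-- ===== PORT A =====
-- inner loop body of A, one step of the foldl over enumerate(word)
def pvStepA (n : Int) (st : List Char × List Char) (p : Int × Char) : List Char × List Char :=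
  let wd := if PySem.Chars.isalnum p.2 then st.1 ++ [p.2] else st.1
  if p.1 == n - 1 || !PySem.Chars.isalnum p.2 then
    let rev := st.2 ++ ((PySem.List.slice? wd none none (-1)).getD [])
    let rev := if !PySem.Chars.isalnum p.2 then rev ++ [p.2] else rev
    ([], rev)
  else (wd, st.2)

def pvRevWordA (word : List Char) : List Char :=
  if PySem.Chars.strIsalnum word then (PySem.List.slice? word none none (-1)).getD []
  else ((PySem.List.enumerate word 0).foldl (pvStepA (word.length : Int)) ([], [])).2

def reverse_each_word (sentence : String) : String :=
  String.ofList (PySem.Chars.join [' '] ((PySem.Chars.splitOn sentence.toList [' ']).map pvRevWordA))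

-- ===== PORT B =====
-- the inner while loop of B: peel off the maximal run of the head's isalnum class
def pvRevWordB : List Char → List Char
  | [] => []
  | c :: cs =>
    let run := cs.takeWhile (fun d => PySem.Chars.isalnum d == PySem.Chars.isalnum c)
    let rest := cs.dropWhile (fun d => PySem.Chars.isalnum d == PySem.Chars.isalnum c)
    (if PySem.Chars.isalnum c then (c :: run).reverse else c :: run) ++ pvRevWordB rest
  termination_by w => w.length
  decreasing_by
    simp only [List.length_cons]
    exact Nat.lt_succ_of_le (List.length_dropWhile_le _ _)

def reverse_each_word_alt (sentence : String) : String :=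
  String.ofList (PySem.Chars.join [' '] ((PySem.Chars.splitOn sentence.toList [' ']).map pvRevWordB))

-- ===== PRECONDITION & SPEC =====
def Spec_reverse_each_word (sentence : String) (out : String) : Prop := out = reverse_each_word_alt sentence
instance (sentence : String) (out : String) : Decidable (Spec_reverse_each_word sentence out) := by unfold Spec_reverse_each_word; infer_instance

-- ===== CLAIM (what is proved, stated in full; the proofs are below) =====
def Claim_equal_reverse_each_word : Prop := ∀ (sentence : String), Dom_reverse_each_word sentence → Spec_reverse_each_word sentence (reverse_each_word sentence)

-- ===== LEMMAS AND PROOFS =====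

-- A's inner fold, with the index test replaced by "remaining suffix is a singleton"
def pvGoA : List Char → List Char × List Char → List Char × List Char
  | [], st => st
  | c :: cs, st =>
    if cs.length == 0 || !PySem.Chars.isalnum c then
      pvGoA cs ([], st.2 ++ (if PySem.Chars.isalnum c then st.1 ++ [c] else st.1).reverse
        ++ (if !PySem.Chars.isalnum c then [c] else []))
    else pvGoA cs ((if PySem.Chars.isalnum c then st.1 ++ [c] else st.1), st.2)

theorem pvFoldl_eq_goA (cs : List Char) : ∀ (i n : Int), i + cs.length = n →
    ∀ st, (PySem.List.enumerate cs i).foldl (pvStepA n) st = pvGoA cs st := by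
  induction cs with
  | nil => intro i n _ st; simp [PySem.List.enumerate_nil, pvGoA]
  | cons c cs ih =>
    intro i n h st
    rw [PySem.List.enumerate_cons, List.foldl_cons]
    have h' : i + ((cs.length : Int) + 1) = n := by
      simp only [List.length_cons] at h; push_cast at h; omega
    have hlen : (i == n - 1) = (cs.length == 0) := by
      by_cases hc : cs.length = 0
      · simp only [hc, beq_self_eq_true, beq_iff_eq]; omega
      · have : i ≠ n - 1 := by
          intro he; subst he; omega
        simp [hc, this]
    have hstep : pvStepA n st (i, c) =
        (if cs.length == 0 || !PySem.Chars.isalnum c then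
           (([] : List Char), st.2 ++ (if PySem.Chars.isalnum c then st.1 ++ [c] else st.1).reverse
              ++ (if !PySem.Chars.isalnum c then [c] else []))
         else ((if PySem.Chars.isalnum c then st.1 ++ [c] else st.1), st.2)) := by
      simp only [pvStepA, PySem.List.slice?_none_none_neg_one, Option.getD_some, hlen]
      split_ifs with h1 h2 <;> simp_all
    rw [hstep]
    simp only [pvGoA]
    by_cases hco : (cs.length == 0 || !PySem.Chars.isalnum c) = true
    · rw [if_pos hco, if_pos hco]
      exact ih (i + 1) n (by omega) _
    · rw [if_neg hco, if_neg hco]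
      exact ih (i + 1) n (by omega) _
  termination_by cs.length

-- takeWhile/dropWhile of isalnum over an all-alnum prefix
theorem pvTwAll (u v : List Char) (h : ∀ d ∈ u, PySem.Chars.isalnum d = true) :
    (u ++ v).takeWhile (fun d => PySem.Chars.isalnum d) =
      u ++ v.takeWhile (fun d => PySem.Chars.isalnum d) ∧
    (u ++ v).dropWhile (fun d => PySem.Chars.isalnum d) =
      v.dropWhile (fun d => PySem.Chars.isalnum d) := by
  induction u with
  | nil => simp
  | cons a u ih =>
    have ha : PySem.Chars.isalnum a = true := h a (by simp)
    have := ih (fun d hd => h d (by simp [hd]))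
    simp [List.takeWhile_cons, List.dropWhile_cons, ha, this.1, this.2]

-- unfolding pvRevWordB at an alnum head with the predicate normalised
theorem pvRevB_alnum_cons (c : Char) (cs : List Char) (hc : PySem.Chars.isalnum c = true) :
    pvRevWordB (c :: cs) =
      (c :: cs.takeWhile (fun d => PySem.Chars.isalnum d)).reverse ++
        pvRevWordB (cs.dropWhile (fun d => PySem.Chars.isalnum d)) := by
  have hp : (fun d => PySem.Chars.isalnum d == PySem.Chars.isalnum c) =
      (fun d => PySem.Chars.isalnum d) := by funext d; simp [hc]
  rw [pvRevWordB, hp, if_pos hc]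

-- splitting off a leading non-alnum char is harmless
theorem pvRevB_nonalnum_cons (c : Char) (cs : List Char) (hc : PySem.Chars.isalnum c = false) :
    pvRevWordB (c :: cs) = c :: pvRevWordB cs := by
  have hp : (fun d => PySem.Chars.isalnum d == PySem.Chars.isalnum c) =
      (fun d => !PySem.Chars.isalnum d) := by funext d; simp [hc]
  rw [pvRevWordB, hp, if_neg (by simp [hc])]
  have h4 : ∀ ds : List Char, pvRevWordB ds =
      ds.takeWhile (fun d => !PySem.Chars.isalnum d) ++
        pvRevWordB (ds.dropWhile (fun d => !PySem.Chars.isalnum d)) := by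
    intro ds
    match ds with
    | [] => simp [pvRevWordB]
    | d :: ds' =>
      by_cases hd : PySem.Chars.isalnum d = true
      · simp [List.takeWhile_cons, List.dropWhile_cons, hd]
      · have hd' : PySem.Chars.isalnum d = false := by simpa using hd
        have hp' : (fun e => PySem.Chars.isalnum e == PySem.Chars.isalnum d) =
            (fun e => !PySem.Chars.isalnum e) := by funext e; simp [hd']
        rw [pvRevWordB, hp', if_neg (by simp [hd'])]
        simp [List.takeWhile_cons, List.dropWhile_cons, hd']
  simp only [List.cons_append, List.cons.injEq, true_and]
  exact (h4 cs).symm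

-- all-alnum words are just reversed
theorem pvRevB_all_alnum (w : List Char) (h : ∀ d ∈ w, PySem.Chars.isalnum d = true) :
    pvRevWordB w = w.reverse := by
  match w with
  | [] => simp [pvRevWordB]
  | c :: cs =>
    have hc := h c (by simp)
    rw [pvRevB_alnum_cons c cs hc]
    obtain ⟨h1, h2⟩ := pvTwAll cs [] (fun d hd => h d (by simp [hd]))
    simp only [List.append_nil, List.takeWhile_nil, List.dropWhile_nil] at h1 h2
    simp [h1, h2, pvRevWordB]

-- flushing an all-alnum pending run at a non-alnum char
theorem pvRevB_flush (wd : List Char) (c : Char) (cs : List Char)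
    (hwd : ∀ d ∈ wd, PySem.Chars.isalnum d = true) (hc : PySem.Chars.isalnum c = false) :
    pvRevWordB (wd ++ c :: cs) = wd.reverse ++ c :: pvRevWordB cs := by
  match wd with
  | [] => simpa using pvRevB_nonalnum_cons c cs hc
  | a :: wd' =>
    have ha := hwd a (by simp)
    have hwd' : ∀ d ∈ wd', PySem.Chars.isalnum d = true := fun d hd => hwd d (by simp [hd])
    rw [List.cons_append, pvRevB_alnum_cons a (wd' ++ c :: cs) ha]
    have htw := pvTwAll wd' (c :: cs) hwd'
    simp only [List.takeWhile_cons, List.dropWhile_cons, hc] at htw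
    simp only [htw.1, htw.2, Bool.false_eq_true, if_false]
    rw [pvRevB_nonalnum_cons c cs hc]
    simp

-- the invariant of A's loop: pending wd is the (all-alnum) run accumulated so far
theorem pvGoA_spec (w : List Char) : w ≠ [] → ∀ wd rev, (∀ d ∈ wd, PySem.Chars.isalnum d = true) →
    (pvGoA w (wd, rev)).2 = rev ++ pvRevWordB (wd ++ w) := by
  induction w with
  | nil => intro h; exact absurd rfl h
  | cons c cs ih =>
    intro _ wd rev hwd
    by_cases hc : PySem.Chars.isalnum c = true
    · by_cases hcs : cs = []
      · subst hcs
        simp only [pvGoA, hc, if_true, List.length_nil]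
        rw [pvRevB_all_alnum (wd ++ [c])
          (by intro d hd; rcases List.mem_append.1 hd with h | h
              · exact hwd d h
              · simp at h; simpa [h] using hc)]
        simp [hc]
      · have hlen : (cs.length == 0) = false := by simpa using hcs
        simp only [pvGoA, hc, hlen, Bool.not_true, Bool.or_false]
        rw [if_neg Bool.false_ne_true, if_pos trivial, ih hcs (wd ++ [c]) rev
          (by intro d hd; rcases List.mem_append.1 hd with h | h
              · exact hwd d h
              · simp at h; simpa [h] using hc)]
        simp
    · have hc' : PySem.Chars.isalnum c = false := by simpa using hc
      have hflush := pvRevB_flush wd c cs hwd hc'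
      simp only [pvGoA, hc', if_false, Bool.not_false, Bool.or_true, if_true]
      by_cases hcs : cs = []
      · subst hcs
        simp only [pvGoA]
        rw [hflush]; simp [pvRevWordB]
      · rw [ih hcs [] _ (by simp)]
        rw [hflush]; simp
termination_by w => w.length

-- per-word agreement
theorem pvRevWordA_eq (w : List Char) : pvRevWordA w = pvRevWordB w := by
  by_cases h : PySem.Chars.strIsalnum w = true
  · have hne : w ≠ [] := by
      intro he; subst he; simp [PySem.Chars.strIsalnum] at h
    have hall : ∀ d ∈ w, PySem.Chars.isalnum d = true := by
      intro d hd
      simp [PySem.Chars.strIsalnum, List.all_eq_true] at h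
      exact h.2 d hd
    rw [pvRevWordA, if_pos h, PySem.List.slice?_none_none_neg_one, Option.getD_some,
      pvRevB_all_alnum w hall]
  · rw [pvRevWordA, if_neg h,
      pvFoldl_eq_goA w 0 (w.length : Int) (by omega) ([], [])]
    match w with
    | [] => simp [pvGoA, pvRevWordB]
    | c :: cs =>
      rw [pvGoA_spec (c :: cs) (by simp) [] [] (by simp)]
      simp

-- ===== VERDICT (by name: the statement is the Claim_ definition above) =====
theorem reverse_each_word_spec : Claim_equal_reverse_each_word := by
  intro s _
  unfold Spec_reverse_each_word reverse_each_word reverse_each_word_alt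
  congr 2
  exact List.map_congr_left (fun w _ => pvRevWordA_eq w)
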